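-- pv_equiv track=rewrite | github.com/Roger1611/ai-context-memory-system | scripts/generate_dev_snapshot.py | _dedupe_entrypoints
-- ===== SOURCE A (Python) =====
-- def _dedupe_entrypoints(entrypoints):
--     preferred = {}
--     order = []
--
--     for packet in entrypoints:
--         path = packet.get("content", "").strip()
--         if not path:
--             continue
--
--         key = path.split("/")[-1]
--         current = preferred.get(key)
--         if current is None:
--             preferred[key] = packet
--             order.append(key)
--             continue
--
--         current_path = current.get("content", "").strip()
--         if "/" in path and "/" not in current_path:
--             preferred[key] = packet
--
--     return [preferred[key] for key in order]
-- ===== SOURCE B (Python) =====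
-- def _dedupe_entrypoints(entrypoints):
--     keyed = []
--     for packet in entrypoints:
--         path = packet.get("content", "").strip()
--         if path:
--             keyed.append((path.split("/")[-1], packet))
--
--     order = []
--     for key, _ in keyed:
--         if key not in order:
--             order.append(key)
--
--     def pick(key):
--         group = [p for k, p in keyed if k == key]
--         for p in group:
--             if "/" in p.get("content", "").strip():
--                 return p
--         return group[0]
--
--     return [pick(key) for key in order]
-- ===== Notes on version B (the rewrite author's own statement) =====
-- stated objective: alternative
-- what changed: A maintains a dict of one preferred packet per basename and conditionally overwrites it while iterating; B never keeps a preferred dict: it builds a flat (key, packet) list, dedups the keys into a first-seen order list, and then for each key scans the flat list for the first slash-containing packet of that key, falling back to the key's first packet.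
import Mathlib
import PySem

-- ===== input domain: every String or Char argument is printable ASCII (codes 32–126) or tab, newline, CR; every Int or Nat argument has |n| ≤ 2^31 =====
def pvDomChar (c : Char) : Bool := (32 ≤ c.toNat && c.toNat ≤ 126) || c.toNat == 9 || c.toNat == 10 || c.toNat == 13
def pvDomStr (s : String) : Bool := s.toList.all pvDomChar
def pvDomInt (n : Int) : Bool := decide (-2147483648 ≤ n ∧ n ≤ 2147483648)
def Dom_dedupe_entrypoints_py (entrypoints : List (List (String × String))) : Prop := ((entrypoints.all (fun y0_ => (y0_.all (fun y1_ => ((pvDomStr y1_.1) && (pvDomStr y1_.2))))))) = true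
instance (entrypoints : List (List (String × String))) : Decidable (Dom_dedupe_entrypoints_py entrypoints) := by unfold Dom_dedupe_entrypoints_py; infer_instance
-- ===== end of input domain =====

-- B replaces A's prefer-on-the-fly dict pass by a flat keyed list, a key-dedup pass and a
-- per-key scan selecting the first slash-containing packet (alternative decomposition, no dict).


-- ===== PORT A =====
-- packet.get("content", "").strip()   (shared by both ports, as both Pythons compute it)
def pvContent (packet : List (String × String)) : String :=
  PySem.Str.strip ((PySem.Dict.mk packet).getD "content" "")

-- path.split("/")[-1]   (split by the non-empty separator "/" is some and never empty, so neither default is reached)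
def pvKey (path : String) : String :=
  (PySem.List.pyGet? ((PySem.Str.split? path "/").getD []) (-1)).getD ""

-- one iteration of A's loop over (preferred, order)
def pvStepA (st : PySem.Dict String (List (String × String)) × List String)
    (packet : List (String × String)) :
    PySem.Dict String (List (String × String)) × List String :=
  if pvContent packet = "" then st  -- path = packet.get("content","").strip(); if not path: continue
  else
    match st.1.get? (pvKey (pvContent packet)) with  -- key = path.split("/")[-1]
    | none => (st.1.insert (pvKey (pvContent packet)) packet, st.2 ++ [pvKey (pvContent packet)])
    | some current =>
      if PySem.Str.isIn "/" (pvContent packet) && !PySem.Str.isIn "/" (pvContent current) then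
        (st.1.insert (pvKey (pvContent packet)) packet, st.2)
      else st

def dedupe_entrypoints_py (entrypoints : List (List (String × String))) : List (List (String × String)) :=
  let st := entrypoints.foldl pvStepA (PySem.Dict.empty, [])
  st.2.map (fun key => st.1.getD key [])  -- preferred[key]: every key in order is present

-- ===== PORT B =====
-- "/" in packet.get("content", "").strip()
def pvSlashy (packet : List (String × String)) : Bool :=
  PySem.Str.isIn "/" (pvContent packet)

-- first loop: keyed.append((path.split("/")[-1], packet)) for non-empty stripped content
def pvKeyed (entrypoints : List (List (String × String))) : List (String × List (String × String)) :=
  entrypoints.foldl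
    (fun keyed packet =>
      if pvContent packet = "" then keyed
      else keyed ++ [(pvKey (pvContent packet), packet)]) []

-- second loop: order.append(key) if key not in order
def pvOrd (keyed : List (String × List (String × String))) : List String :=
  keyed.foldl (fun ord kp => if kp.1 ∈ ord then ord else ord ++ [kp.1]) []

-- group = [p for k, p in keyed if k == key]
def pvGroup (keyed : List (String × List (String × String))) (key : String) :
    List (List (String × String)) :=
  (keyed.filter (fun kp => kp.1 == key)).map Prod.snd

-- pick(key): first slash-containing packet of the group, else group[0]
-- (group is non-empty for every key in order, so group[0] is reached only on non-empty groups)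
def pvPick (keyed : List (String × List (String × String))) (key : String) :
    List (String × String) :=
  match (pvGroup keyed key).find? pvSlashy with
  | some p => p
  | none => (pvGroup keyed key).headD []

def dedupe_entrypoints_py_alt (entrypoints : List (List (String × String))) : List (List (String × String)) :=
  (pvOrd (pvKeyed entrypoints)).map (pvPick (pvKeyed entrypoints))

-- ===== PRECONDITION & SPEC =====
def Spec_dedupe_entrypoints_py (entrypoints : List (List (String × String))) (out : List (List (String × String))) : Prop := out = dedupe_entrypoints_py_alt entrypoints
instance (entrypoints : List (List (String × String))) (out : List (List (String × String))) : Decidable (Spec_dedupe_entrypoints_py entrypoints out) := by unfold Spec_dedupe_entrypoints_py; infer_instance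

-- ===== CLAIM (what is proved, stated in full; the proofs are below) =====
def Claim_equal_dedupe_entrypoints_py : Prop := ∀ (entrypoints : List (List (String × String))), Dom_dedupe_entrypoints_py entrypoints → Spec_dedupe_entrypoints_py entrypoints (dedupe_entrypoints_py entrypoints)

-- ===== LEMMAS AND PROOFS =====

-- the selection B's pick makes on a group, abstracted from pvKeyed
def pvSelect (g : List (List (String × String))) : List (String × String) :=
  match g.find? pvSlashy with
  | some p => p
  | none => g.headD []

lemma pvPick_eq (keyed : List (String × List (String × String))) (key : String) :
    pvPick keyed key = pvSelect (pvGroup keyed key) := rfl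

lemma pvSelect_singleton (p : List (String × String)) : pvSelect [p] = p := by
  unfold pvSelect
  cases hp : pvSlashy p <;> simp [List.find?, hp]

lemma pvSlashy_select (g : List (List (String × String))) (hg : g ≠ []) :
    pvSlashy (pvSelect g) = g.any pvSlashy := by
  unfold pvSelect
  cases h : g.find? pvSlashy with
  | some q =>
    have h1 := List.find?_some h
    have h2 := List.mem_of_find?_eq_some h
    rw [h1]
    exact (List.any_of_mem h2 h1).symm
  | none =>
    have hany : g.any pvSlashy = false := by
      rw [List.any_eq_false]
      exact List.find?_eq_none.mp h
    rw [hany]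
    cases g with
    | nil => exact absurd rfl hg
    | cons a t =>
      simp only [List.headD_cons]
      simpa using (List.any_eq_false.mp hany) a (by simp)

lemma pvSelect_append (g : List (List (String × String))) (p : List (String × String)) (hg : g ≠ []) :
    pvSelect (g ++ [p]) =
      if g.any pvSlashy then pvSelect g
      else if pvSlashy p then p else pvSelect g := by
  unfold pvSelect
  rw [List.find?_append]
  cases h : g.find? pvSlashy with
  | some q =>
    have : g.any pvSlashy = true := List.any_of_mem (List.mem_of_find?_eq_some h) (List.find?_some h)
    simp [this]
  | none =>
    have hany : g.any pvSlashy = false := by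
      rw [List.any_eq_false]; exact List.find?_eq_none.mp h
    simp only [hany, Bool.false_eq_true, if_false, Option.none_or]
    cases hp : pvSlashy p
    · simp only [List.find?, hp, Bool.false_eq_true, if_false]
      cases g with
      | nil => exact absurd rfl hg
      | cons a t => simp
    · simp [List.find?, hp]

lemma pvGroup_append (done : List (String × List (String × String)))
    (kp : String × List (String × String)) (k : String) :
    pvGroup (done ++ [kp]) k =
      pvGroup done k ++ (if kp.1 == k then [kp.2] else []) := by
  unfold pvGroup
  rw [List.filter_append, List.map_append]
  cases h : (kp.1 == k) <;> simp [List.filter, h]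

lemma pvOrd_append (done : List (String × List (String × String)))
    (kp : String × List (String × String)) :
    pvOrd (done ++ [kp]) =
      if kp.1 ∈ pvOrd done then pvOrd done else pvOrd done ++ [kp.1] := by
  unfold pvOrd
  rw [List.foldl_append]
  rfl

-- k appears in pvOrd iff its group is non-empty
lemma pvOrd_mem_aux (l : List (String × List (String × String))) (acc : List String) (k : String) :
    (k ∈ l.foldl (fun ord kp => if kp.1 ∈ ord then ord else ord ++ [kp.1]) acc) ↔
      k ∈ acc ∨ k ∈ l.map Prod.fst := by
  induction l generalizing acc with
  | nil => simp
  | cons kp t ih =>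
    simp only [List.foldl_cons, List.map_cons, List.mem_cons]
    rw [ih]
    by_cases h : kp.1 ∈ acc
    · simp only [if_pos h]
      constructor
      · rintro (ha | ht)
        · exact Or.inl ha
        · exact Or.inr (Or.inr ht)
      · rintro (ha | hk | ht)
        · exact Or.inl ha
        · exact Or.inl (hk ▸ h)
        · exact Or.inr ht
    · simp only [if_neg h, List.mem_append, List.mem_singleton]
      tauto

lemma pvGroup_ne_iff (done : List (String × List (String × String))) (k : String) :
    pvGroup done k ≠ [] ↔ k ∈ done.map Prod.fst := by
  unfold pvGroup
  simp only [ne_eq, List.map_eq_nil_iff, List.filter_eq_nil_iff, List.mem_map]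
  constructor
  · intro h
    by_contra hn
    apply h
    intro kp hm
    by_contra hb
    exact hn ⟨kp, hm, by simpa using hb⟩
  · rintro ⟨kp, hm, hk⟩ h
    exact absurd (by simpa using hk) (by simpa using h kp hm)

lemma pvOrd_mem (done : List (String × List (String × String))) (k : String) :
    (k ∈ pvOrd done) ↔ pvGroup done k ≠ [] := by
  rw [pvGroup_ne_iff]
  unfold pvOrd
  simpa using pvOrd_mem_aux done [] k

-- pvKeyed as a fold starting from an arbitrary accumulated list
lemma pvKeyed_aux (l : List (List (String × String))) (done : List (String × List (String × String))) :
    l.foldl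
      (fun keyed packet =>
        if pvContent packet = "" then keyed
        else keyed ++ [(pvKey (pvContent packet), packet)]) done
    = done ++ pvKeyed l := by
  induction l generalizing done with
  | nil => simp [pvKeyed]
  | cons p t ih =>
    simp only [pvKeyed, List.foldl_cons]
    by_cases h : pvContent p = ""
    · rw [if_pos h, if_pos h, ih, ih]
      simp
    · rw [if_neg h, if_neg h, ih, ih]
      simp

lemma pvKeyed_cons_skip (p : List (String × String)) (t : List (List (String × String)))
    (h : pvContent p = "") : pvKeyed (p :: t) = pvKeyed t := by
  simp only [pvKeyed, List.foldl_cons, if_pos h]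

lemma pvKeyed_cons (p : List (String × String)) (t : List (List (String × String)))
    (h : ¬ pvContent p = "") :
    pvKeyed (p :: t) = (pvKey (pvContent p), p) :: pvKeyed t := by
  have h0 : pvKeyed (p :: t)
      = t.foldl
          (fun keyed packet =>
            if pvContent packet = "" then keyed
            else keyed ++ [(pvKey (pvContent packet), packet)])
          (if pvContent p = "" then [] else [] ++ [(pvKey (pvContent p), p)]) := rfl
  rw [h0, if_neg h, pvKeyed_aux]
  simp

-- step-reduction lemmas for A's loop body
lemma pvStepA_skip (st : PySem.Dict String (List (String × String)) × List String)
    (p : List (String × String)) (h : pvContent p = "") : pvStepA st p = st := by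
  unfold pvStepA; rw [if_pos h]

lemma pvStepA_new (st : PySem.Dict String (List (String × String)) × List String)
    (p : List (String × String)) (h : ¬ pvContent p = "")
    (h2 : st.1.get? (pvKey (pvContent p)) = none) :
    pvStepA st p = (st.1.insert (pvKey (pvContent p)) p, st.2 ++ [pvKey (pvContent p)]) := by
  unfold pvStepA; rw [if_neg h]; rw [h2]

lemma pvStepA_hit (st : PySem.Dict String (List (String × String)) × List String)
    (p cur : List (String × String)) (h : ¬ pvContent p = "")
    (h2 : st.1.get? (pvKey (pvContent p)) = some cur)
    (h3 : (PySem.Str.isIn "/" (pvContent p) && !PySem.Str.isIn "/" (pvContent cur)) = true) :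
    pvStepA st p = (st.1.insert (pvKey (pvContent p)) p, st.2) := by
  unfold pvStepA; rw [if_neg h]; rw [h2]; exact if_pos h3

lemma pvStepA_keep (st : PySem.Dict String (List (String × String)) × List String)
    (p cur : List (String × String)) (h : ¬ pvContent p = "")
    (h2 : st.1.get? (pvKey (pvContent p)) = some cur)
    (h3 : ¬ (PySem.Str.isIn "/" (pvContent p) && !PySem.Str.isIn "/" (pvContent cur)) = true) :
    pvStepA st p = st := by
  unfold pvStepA; rw [if_neg h]; rw [h2]; exact if_neg h3

-- the relation between A's loop state and an accumulated keyed list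
def pvRel (st : PySem.Dict String (List (String × String)) × List String)
    (done : List (String × List (String × String))) : Prop :=
  st.2 = pvOrd done ∧
  ∀ k, st.1.get? k =
    if pvGroup done k = [] then none else some (pvSelect (pvGroup done k))

-- one packet of A's loop preserves the relation
lemma pvStep_rel (st : PySem.Dict String (List (String × String)) × List String)
    (done : List (String × List (String × String)))
    (p : List (String × String)) (h : pvRel st done) :
    pvRel (pvStepA st p) (done ++ pvKeyed [p]) := by
  obtain ⟨hord, hpref⟩ := h
  by_cases hp : pvContent p = ""
  · have hk1 : pvKeyed [p] = [] := by
      simp only [pvKeyed, List.foldl_cons, List.foldl_nil, if_pos hp]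
    rw [pvStepA_skip _ _ hp, hk1, List.append_nil]
    exact ⟨hord, hpref⟩
  · have hk1 : pvKeyed [p] = [(pvKey (pvContent p), p)] := by
      simp only [pvKeyed, List.foldl_cons, List.foldl_nil, if_neg hp, List.nil_append]
    rw [hk1]
    generalize hK : pvKey (pvContent p) = K
    by_cases hg : pvGroup done K = []
    · -- new key
      have hpK : st.1.get? (pvKey (pvContent p)) = none := by
        rw [hK, hpref, if_pos hg]
      rw [pvStepA_new _ _ hp hpK, hK]
      refine ⟨?_, fun k => ?_⟩
      · have hKn : K ∉ pvOrd done := by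
          rw [pvOrd_mem]; simpa using hg
        rw [pvOrd_append, if_neg hKn, hord]
      · rw [pvGroup_append]
        by_cases hk : k = K
        · rw [hk]
          rw [PySem.Dict.get?_insert_self]
          have hbe : ((K, p).1 == K) = true := by simp
          rw [hbe, if_pos rfl, hg, List.nil_append]
          rw [if_neg (by simp), pvSelect_singleton]
        · have hbe : ((K, p).1 == k) = false := by
            simp only [beq_eq_false_iff_ne, ne_eq]
            exact fun h' => hk h'.symm
          rw [PySem.Dict.get?_insert_of_ne _ _ hk, hbe, if_neg (by simp : ¬ (false = true))]
          rw [List.append_nil]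
          exact hpref k
    · -- existing key
      have hpK : st.1.get? (pvKey (pvContent p))
          = some (pvSelect (pvGroup done K)) := by
        rw [hK, hpref, if_neg hg]
      have hKin : K ∈ pvOrd done := by
        rw [pvOrd_mem]; exact hg
      have hordK : pvOrd (done ++ [(K, p)]) = pvOrd done := by
        rw [pvOrd_append, if_pos hKin]
      have hslash := pvSlashy_select _ hg
      by_cases hc : (PySem.Str.isIn "/" (pvContent p)
          && !PySem.Str.isIn "/" (pvContent (pvSelect (pvGroup done K)))) = true
      · rw [pvStepA_hit _ _ _ hp hpK hc, hK]
        refine ⟨by rw [hordK]; exact hord, fun k => ?_⟩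
        rw [pvGroup_append]
        by_cases hk : k = K
        · rw [hk]
          rw [PySem.Dict.get?_insert_self]
          have hbe : ((K, p).1 == K) = true := by simp
          rw [hbe, if_pos rfl]
          rw [if_neg (by simp)]
          rw [pvSelect_append _ _ hg]
          rw [Bool.and_eq_true, Bool.not_eq_true'] at hc
          have hanyf : (pvGroup done K).any pvSlashy = false := by
            rw [← hslash]; exact hc.2
          have hpp : pvSlashy p = true := hc.1
          rw [if_neg (by simp [hanyf]), if_pos hpp]
        · have hbe : ((K, p).1 == k) = false := by
            simp only [beq_eq_false_iff_ne, ne_eq]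
            exact fun h' => hk h'.symm
          rw [PySem.Dict.get?_insert_of_ne _ _ hk, hbe, if_neg (by simp : ¬ (false = true))]
          rw [List.append_nil]
          exact hpref k
      · rw [pvStepA_keep _ _ _ hp hpK hc]
        refine ⟨by rw [hordK]; exact hord, fun k => ?_⟩
        rw [pvGroup_append]
        by_cases hk : k = K
        · rw [hk]
          have hbe : ((K, p).1 == K) = true := by simp
          rw [hbe, if_pos rfl]
          rw [if_neg (by simp)]
          have hpK' : st.1.get? K = some (pvSelect (pvGroup done K)) := by
            rw [hpref, if_neg hg]
          rw [pvSelect_append _ _ hg, hpK']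
          cases hany : (pvGroup done K).any pvSlashy
          · have hself : pvSlashy (pvSelect (pvGroup done K)) = false := by
              rw [hslash, hany]
            have hpp : pvSlashy p = false := by
              cases hpp : pvSlashy p
              · rfl
              · exfalso
                apply hc
                rw [Bool.and_eq_true, Bool.not_eq_true']
                exact ⟨hpp, hself⟩
            rw [if_neg (by simp), if_neg (by simp [hpp])]
          · rw [if_pos rfl]
        · have hbe : ((K, p).1 == k) = false := by
            simp only [beq_eq_false_iff_ne, ne_eq]
            exact fun h' => hk h'.symm
          rw [hbe, if_neg (by simp : ¬ (false = true)), List.append_nil]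
          exact hpref k

-- pvKeyed splits on cons
lemma pvKeyed_cons_split (p : List (String × String)) (t : List (List (String × String))) :
    pvKeyed (p :: t) = pvKeyed [p] ++ pvKeyed t := by
  by_cases hp : pvContent p = ""
  · rw [pvKeyed_cons_skip _ _ hp]
    have : pvKeyed [p] = [] := by
      simp only [pvKeyed, List.foldl_cons, List.foldl_nil, if_pos hp]
    rw [this, List.nil_append]
  · rw [pvKeyed_cons _ _ hp]
    have : pvKeyed [p] = [(pvKey (pvContent p), p)] := by
      simp only [pvKeyed, List.foldl_cons, List.foldl_nil, if_neg hp, List.nil_append]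
    rw [this]
    rfl

-- main invariant: running A's loop on l from a state related to done lands in a state
-- related to done ++ pvKeyed l
lemma pvMain (l : List (List (String × String)))
    (st : PySem.Dict String (List (String × String)) × List String)
    (done : List (String × List (String × String)))
    (h : pvRel st done) :
    pvRel (l.foldl pvStepA st) (done ++ pvKeyed l) := by
  induction l generalizing st done with
  | nil => simpa [pvKeyed] using h
  | cons p t ih =>
    rw [List.foldl_cons, pvKeyed_cons_split, ← List.append_assoc]
    exact ih _ _ (pvStep_rel st done p h)

-- ===== VERDICT (by name: the statement is the Claim_ definition above) =====
theorem dedupe_entrypoints_py_spec : Claim_equal_dedupe_entrypoints_py := by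
  intro entrypoints _
  show ((entrypoints.foldl pvStepA (PySem.Dict.empty, [])).2).map
        (fun key => (entrypoints.foldl pvStepA (PySem.Dict.empty, [])).1.getD key [])
      = (pvOrd (pvKeyed entrypoints)).map (pvPick (pvKeyed entrypoints))
  have hinit : pvRel ((PySem.Dict.empty : PySem.Dict String (List (String × String))), ([] : List String)) [] := by
    refine ⟨rfl, fun k => ?_⟩
    rw [PySem.Dict.get?_empty]
    have : pvGroup [] k = [] := rfl
    rw [this, if_pos rfl]
  obtain ⟨hord, hpref⟩ := pvMain entrypoints _ [] hinit
  rw [List.nil_append] at hord hpref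
  rw [hord]
  apply List.map_congr_left
  intro k hk
  rw [pvOrd_mem] at hk
  rw [PySem.Dict.getD_eq_get?_getD, hpref k, pvPick_eq, if_neg hk]
  rfl
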